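-- pv_equiv track=rewrite | github.com/Telepact/telepact | lib/py/telepact/internal/schema/GetPathDocumentYamlCoordinatesPseudoJson.py | _find_mapping_colon
-- ===== SOURCE A (Python) =====
-- def _find_mapping_colon(text: str) -> int:
--     quote: str | None = None
--     for index, char in enumerate(text):
--         if char in ('"', "'"):
--             quote = None if quote == char else (char if quote is None else quote)
--             continue
--         if quote is None and char == ':' and (index + 1 == len(text) or text[index + 1] == ' '):
--             return index
--     return -1
-- ===== SOURCE B (Python) =====
-- def _find_mapping_colon(text: str) -> int:
--     i = 0
--     n = len(text)
--     while i < n: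
--         ch = text[i]
--         if ch in ('"', "'"):
--             j = text.find(ch, i + 1)
--             if j == -1:
--                 return -1
--             i = j + 1
--         elif ch == ':' and (i + 1 == n or text[i + 1] == ' '):
--             return i
--         else:
--             i += 1
--     return -1
-- ===== Notes on version B (the rewrite author's own statement) =====
-- stated objective: idiomatic
-- what changed: Replaced the per-character quote-state toggle (enumerate + Optional quote variable) with an explicit index while-loop that skips each quoted span in one str.find call, dropping the state variable entirely.
import Mathlib
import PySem

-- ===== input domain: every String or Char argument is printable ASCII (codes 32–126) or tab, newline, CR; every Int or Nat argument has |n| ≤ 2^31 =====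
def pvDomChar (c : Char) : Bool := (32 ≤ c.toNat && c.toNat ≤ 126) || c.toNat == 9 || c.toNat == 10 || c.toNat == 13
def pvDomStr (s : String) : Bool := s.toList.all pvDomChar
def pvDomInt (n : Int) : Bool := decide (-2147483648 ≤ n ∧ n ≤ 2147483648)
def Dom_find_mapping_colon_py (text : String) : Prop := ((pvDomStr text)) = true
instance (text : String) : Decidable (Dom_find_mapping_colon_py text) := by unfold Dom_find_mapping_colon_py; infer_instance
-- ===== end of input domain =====

-- B replaces A's per-character quote-state toggling with an index loop that skips each
-- quoted span in one `find` step (objective: idiomatic/alternative decomposition; same cost).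

-- ===== PORT A =====
-- the for-loop of A: state = (index, quote); branches in A's order
def pvALoop : List Char → Int → Option Char → Int
  | [], _, _ => -1
  | c :: rest, i, quote =>
    if c = '"' ∨ c = '\'' then
      pvALoop rest (i + 1)
        (if quote = some c then none else if quote = none then some c else quote)
    else if quote = none ∧ c = ':' ∧ (rest = [] ∨ rest.head? = some ' ') then i
    else pvALoop rest (i + 1) quote

def find_mapping_colon_py (text : String) : Int := pvALoop text.toList 0 none

-- ===== PORT B =====
-- the while-loop of B over the suffix starting at absolute index i;
-- `text.find(ch, i+1)` on the suffix c::rest is `rest.idxOf? c` (j absolute = i+1+j)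
def pvBLoop : List Char → Int → Int
  | [], _ => -1
  | c :: rest, i =>
    if c = '"' ∨ c = '\'' then
      match rest.idxOf? c with
      | none => -1
      | some j => pvBLoop (rest.drop (j + 1)) (i + 1 + (j : Int) + 1)
    else if c = ':' ∧ (rest = [] ∨ rest.head? = some ' ') then i
    else pvBLoop rest (i + 1)
termination_by l _ => l.length
decreasing_by
  · simpa using Nat.lt_succ_of_le (Nat.sub_le _ _)
  · simp

def find_mapping_colon_py_alt (text : String) : Int := pvBLoop text.toList 0

-- ===== PRECONDITION & SPEC =====
def Spec_find_mapping_colon_py (text : String) (out : Int) : Prop := out = find_mapping_colon_py_alt text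
instance (text : String) (out : Int) : Decidable (Spec_find_mapping_colon_py text out) := by unfold Spec_find_mapping_colon_py; infer_instance

-- ===== CLAIM (what is proved, stated in full; the proofs are below) =====
def Claim_equal_find_mapping_colon_py : Prop := ∀ (text : String), Dom_find_mapping_colon_py text → Spec_find_mapping_colon_py text (find_mapping_colon_py text)

-- ===== LEMMAS AND PROOFS =====

-- While A's state is `some q`, every non-`q` character is skipped (colons included),
-- so the loop amounts to jumping past the first occurrence of q.
theorem pvALoop_some (q : Char) (hq : q = '"' ∨ q = '\'') :
    ∀ (l : List Char) (i : Int),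
      pvALoop l i (some q) =
        match l.idxOf? q with
        | none => -1
        | some j => pvALoop (l.drop (j + 1)) (i + (j : Int) + 1) none := by
  intro l
  induction l with
  | nil => intro i; simp [pvALoop, List.idxOf?]
  | cons c rest ih =>
    intro i
    by_cases hcq : c = q
    · subst hcq
      simp [pvALoop, hq, List.idxOf?, List.findIdx?_cons]
    · by_cases hquote : c = '"' ∨ c = '\''
      · have hst : (if (some q : Option Char) = some c then none
            else if (some q : Option Char) = none then some c else some q) = some q := by
          simp [Ne.symm hcq]
        rw [pvALoop, if_pos hquote, hst, ih (i + 1)]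
        have hfind : (c :: rest).idxOf? q = (rest.idxOf? q).map (· + 1) := by
          simp [List.idxOf?, List.findIdx?_cons, beq_iff_eq, hcq]
        rw [hfind]
        cases rest.idxOf? q with
        | none => simp
        | some j =>
          simp only [Option.map_some]
          have : ((j : Int) + 1) = ((j + 1 : Nat) : Int) := by push_cast; ring
          simp [List.drop_succ_cons]
          ring_nf
      · rw [pvALoop]
        simp only [hquote, if_neg, not_false_iff]
        have hne : ¬ ((some q : Option Char) = none ∧ c = ':' ∧ (rest = [] ∨ rest.head? = some ' ')) := by
          simp
        rw [if_neg hne, ih (i + 1)]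
        have hfind : (c :: rest).idxOf? q = (rest.idxOf? q).map (· + 1) := by
          have : c ≠ q := hcq
          simp [List.idxOf?, List.findIdx?_cons, this]
        rw [hfind]
        cases rest.idxOf? q with
        | none => simp
        | some j =>
          simp only [Option.map_some]
          simp [List.drop_succ_cons]
          ring_nf

theorem pvLoop_agree : ∀ (n : Nat) (l : List Char), l.length ≤ n → ∀ i : Int,
    pvALoop l i none = pvBLoop l i := by
  intro n
  induction n with
  | zero =>
    intro l hl i
    have : l = [] := List.eq_nil_of_length_eq_zero (Nat.le_zero.mp hl)
    subst this
    simp [pvALoop, pvBLoop]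
  | succ n ih =>
    intro l hl i
    cases l with
    | nil => simp [pvALoop, pvBLoop]
    | cons c rest =>
      by_cases hquote : c = '"' ∨ c = '\''
      · have hupd : (if (none : Option Char) = some c then none
            else if (none : Option Char) = none then some c else none) = some c := by simp
        rw [pvALoop, pvBLoop, if_pos hquote, if_pos hquote, hupd, pvALoop_some c hquote]
        cases hfind : rest.idxOf? c with
        | none => simp
        | some j =>
          simp only []
          have hlen : (rest.drop (j + 1)).length ≤ n := by
            have h1 : (rest.drop (j + 1)).length ≤ rest.length := by
              simp
            have h2 : rest.length ≤ n := by simpa using Nat.succ_le_succ_iff.mp hl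
            omega
          rw [ih _ hlen]
      · rw [pvALoop, pvBLoop, if_neg hquote, if_neg hquote]
        by_cases hc : c = ':' ∧ (rest = [] ∨ rest.head? = some ' ')
        · rw [if_pos ⟨rfl, hc.1, hc.2⟩, if_pos hc]
        · have hc' : ¬ ((none : Option Char) = none ∧ c = ':' ∧ (rest = [] ∨ rest.head? = some ' ')) := by
            simpa using hc
          rw [if_neg hc', if_neg hc]
          exact ih rest (Nat.succ_le_succ_iff.mp hl) (i + 1)

-- ===== VERDICT (by name: the statement is the Claim_ definition above) =====
theorem find_mapping_colon_py_spec : Claim_equal_find_mapping_colon_py := by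
  intro text _
  unfold Spec_find_mapping_colon_py find_mapping_colon_py find_mapping_colon_py_alt
  exact pvLoop_agree text.toList.length text.toList le_rfl 0
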